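-- pv_equiv track=rewrite | github.com/Laxdip/password-analyzer | password_strength/patterns.py | check_repeated_chars
-- ===== SOURCE A (Python) =====
-- def check_repeated_chars(password):
--     """
--     Check for repeated characters (aaa, 111, etc)
--     """
--     score = 0
--     issues = []
--
--     # Check for 3+ repeated characters
--     for i in range(len(password) - 2):
--         if password[i] == password[i+1] == password[i+2]:
--             score += 4
--             issues.append(f"❌ Repeated character '{password[i]}' appears 3+ times")
--             break
--
--     # Check for 2 repeated characters multiple times
--     repeat_count = 0
--     for i in range(len(password) - 1):
--         if password[i] == password[i+1]:
--             repeat_count += 1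
--
--     if repeat_count >= 2:
--         score += 3
--         issues.append(f"❌ Multiple repeated character pairs")
--
--     return min(score, 10), issues[:2]
-- ===== SOURCE B (Python) =====
-- def check_repeated_chars(password):
--     """
--     Run-length encode the password once, then read the answer off the runs:
--     the first run of length >= 3 gives the triple issue; the adjacent-pair
--     count is sum(run_length - 1).
--     """
--     runs = []
--     i = 0
--     while i < len(password):
--         j = i
--         while j < len(password) and password[j] == password[i]:
--             j += 1
--         runs.append((password[i], j - i))
--         i = j
--     triple = next((ch for ch, n in runs if n >= 3), None)
--     pairs = sum(n - 1 for _, n in runs)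
--     score = (4 if triple is not None else 0) + (3 if pairs >= 2 else 0)
--     issues = ([f"❌ Repeated character '{triple}' appears 3+ times"] if triple is not None else []) \
--              + (["❌ Multiple repeated character pairs"] if pairs >= 2 else [])
--     return min(score, 10), issues[:2]
-- ===== Notes on version B (the rewrite author's own statement) =====
-- stated objective: simpler
-- what changed: Replaces A's two separate index-window scans (a break-loop over triples and a pair-counting loop) by a single run-length encoding of the password, from which the first long run and the pair count sum(len-1) are read off, with the result assembled arithmetically.
import Mathlib
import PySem

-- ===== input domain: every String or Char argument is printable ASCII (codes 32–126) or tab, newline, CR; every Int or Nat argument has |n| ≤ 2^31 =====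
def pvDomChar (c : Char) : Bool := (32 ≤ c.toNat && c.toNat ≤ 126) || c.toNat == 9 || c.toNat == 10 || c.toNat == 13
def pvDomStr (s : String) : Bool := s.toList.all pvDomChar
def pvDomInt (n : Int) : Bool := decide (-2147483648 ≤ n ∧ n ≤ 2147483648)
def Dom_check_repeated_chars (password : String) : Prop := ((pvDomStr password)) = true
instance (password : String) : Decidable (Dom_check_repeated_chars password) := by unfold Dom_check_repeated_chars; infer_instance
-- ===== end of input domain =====

-- ===== PORT A =====
def pvTripleScanA : List Char → Option Char
  | a :: b :: c :: rest =>
      if a = b ∧ b = c then some a else pvTripleScanA (b :: c :: rest)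
  | _ => none

def pvPairCountA : List Char → Int
  | a :: b :: rest => (if a = b then 1 else 0) + pvPairCountA (b :: rest)
  | _ => 0

-- A's break-loop over `range(len-2)` comparing password[i..i+2] ported as a scan
-- over suffixes (exact: every index the loop touches is in range), likewise the
-- pair-counting loop over `range(len-1)`.
def check_repeated_chars (password : String) : Int × List String :=
  let cs := password.toList
  let p1 : Int × List String :=
    match pvTripleScanA cs with
    | some ch => (4, ["❌ Repeated character '" ++ String.ofList [ch] ++ "' appears 3+ times"])
    | none => (0, [])
  let repeatCount := pvPairCountA cs
  let p2 : Int × List String :=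
    if repeatCount ≥ 2 then (p1.1 + 3, p1.2 ++ ["❌ Multiple repeated character pairs"])
    else p1
  (min p2.1 10, p2.2.take 2)


-- ===== PORT B =====
-- run-length encoding: maximal runs of equal adjacent characters, as (char, length)
def pvRuns : List Char → List (Char × Nat)
  | [] => []
  | c :: rest =>
      (c, 1 + (rest.takeWhile (· == c)).length) :: pvRuns (rest.dropWhile (· == c))
termination_by l => l.length
decreasing_by
  simpa using Nat.lt_succ_of_le (List.length_dropWhile_le (· == c) rest)

def pvFirstBig : List (Char × Nat) → Option Char
  | [] => none
  | (c, n) :: t => if n ≥ 3 then some c else pvFirstBig t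

def check_repeated_chars_alt (password : String) : Int × List String :=
  let rs := pvRuns password.toList
  let triple := pvFirstBig rs
  let pairs : Int := (rs.map (fun r => (r.2 : Int) - 1)).sum
  let score : Int := (if triple.isSome then 4 else 0) + (if pairs ≥ 2 then 3 else 0)
  let issues :=
    (match triple with
     | some ch => ["❌ Repeated character '" ++ String.ofList [ch] ++ "' appears 3+ times"]
     | none => []) ++
    (if pairs ≥ 2 then ["❌ Multiple repeated character pairs"] else [])
  (min score 10, issues.take 2)


-- ===== PRECONDITION & SPEC =====
def Spec_check_repeated_chars (password : String) (out : Int × List String) : Prop := out = check_repeated_chars_alt password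
instance (password : String) (out : Int × List String) : Decidable (Spec_check_repeated_chars password out) := by unfold Spec_check_repeated_chars; infer_instance

-- ===== CLAIM (what is proved, stated in full; the proofs are below) =====
def Claim_equal_check_repeated_chars : Prop := ∀ (password : String), Dom_check_repeated_chars password → Spec_check_repeated_chars password (check_repeated_chars password)

-- ===== LEMMAS AND PROOFS =====

lemma pvRuns_cons_ne (c b : Char) (t : List Char) (h : ¬ b = c) :
    pvRuns (c :: b :: t) = (c, 1) :: pvRuns (b :: t) := by
  have hb : (b == c) = false := by simpa using h
  rw [pvRuns]
  simp [List.takeWhile, List.dropWhile, hb]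

lemma pvRuns_cons_self (c : Char) (t : List Char) :
    pvRuns (c :: c :: t) =
      (c, 2 + (t.takeWhile (· == c)).length) :: pvRuns (t.dropWhile (· == c)) := by
  rw [pvRuns]
  simp [List.takeWhile, List.dropWhile]
  omega

lemma triple_eq_firstBig (cs : List Char) :
    pvTripleScanA cs = pvFirstBig (pvRuns cs) := by
  induction cs with
  | nil => simp [pvTripleScanA, pvRuns, pvFirstBig]
  | cons c rest ih =>
    match rest with
    | [] => simp [pvTripleScanA, pvRuns, pvFirstBig]
    | b :: t =>
      by_cases hcb : c = b
      · subst hcb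
        match t with
        | [] =>
          rw [pvRuns_cons_self]
          simp [pvTripleScanA, pvRuns, pvFirstBig, List.takeWhile]
        | e :: t' =>
          by_cases hce : c = e
          · subst hce
            rw [pvRuns_cons_self]
            simp [pvTripleScanA, pvFirstBig, List.takeWhile]
            omega
          · rw [pvRuns_cons_self]
            have hb : (e == c) = false := by simp; exact fun h => hce h.symm
            have htw : (e :: t').takeWhile (· == c) = [] := by
              simp [List.takeWhile, hb]
            have hdw : (e :: t').dropWhile (· == c) = e :: t' := by
              simp [List.dropWhile, hb]
            rw [htw, hdw]
            have h1 : pvTripleScanA (c :: c :: e :: t') = pvTripleScanA (c :: e :: t') := by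
              simp [pvTripleScanA, hce]
            rw [h1, ih]
            rw [pvRuns_cons_ne c e t' (fun h => hce h.symm)]
            simp [pvFirstBig]
      · rw [pvRuns_cons_ne c b t (fun h => hcb h.symm)]
        have h1 : pvTripleScanA (c :: b :: t) = pvTripleScanA (b :: t) := by
          match t with
          | [] => simp [pvTripleScanA]
          | e :: t' => simp [pvTripleScanA, hcb]
        rw [h1, ih]
        simp [pvFirstBig]

lemma pairs_eq_runs (cs : List Char) :
    pvPairCountA cs = ((pvRuns cs).map (fun r => (r.2 : Int) - 1)).sum := by
  induction cs with
  | nil => simp [pvPairCountA, pvRuns]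
  | cons c rest ih =>
    match rest with
    | [] => simp [pvPairCountA, pvRuns, List.takeWhile, List.dropWhile]
    | b :: t =>
      by_cases hcb : c = b
      · subst hcb
        rw [pvRuns_cons_self]
        rw [pvRuns] at ih
        simp [pvPairCountA] at ih ⊢
        rw [ih]
        ring
      · rw [pvRuns_cons_ne c b t (fun h => hcb h.symm)]
        simp [pvPairCountA, hcb, ih]

-- ===== VERDICT (by name: the statement is the Claim_ definition above) =====
theorem check_repeated_chars_spec : Claim_equal_check_repeated_chars := by
  intro password _
  unfold Spec_check_repeated_chars
  simp only [check_repeated_chars, check_repeated_chars_alt, triple_eq_firstBig, pairs_eq_runs]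
  cases pvFirstBig (pvRuns password.toList) <;> simp <;> split <;> simp
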